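-- pv_equiv track=rewrite | github.com/medabdellahihabib/Dhamet_jeu | PROJET_ENTREPRENARIAT/bruillion_2.py | pos_cl
-- ===== SOURCE A (Python) =====
-- position = [(u, v) for v in range(68, 700, 66) for u in range(15, 800, 93)]
--
-- def inPos(pos, pos_piece, r=13):
--     if (pos_piece[0] - pos[0] + 12.5) ** 2 + (pos_piece[1] - pos[1] + 12.5) ** 2 <= 2 * r ** 2:
--         return True
--     return False
--
-- def pos_cl(pos):
--     k = 400
--     for i in range(81):
--         if inPos(pos, position[i]):
--             k = i
--     if k == 400:
--         pass
--     else: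
--         return position[k]
-- ===== SOURCE B (Python) =====
-- def pos_cl(pos):
--     # O(1): invert the lattice to the single candidate cell instead of scanning 81 cells.
--     x, y = pos
--     u = (x + 19) // 93          # nearest u-index to (x - 27.5) / 93
--     v = (2 * y - 95) // 132     # nearest v-index to (y - 80.5) / 66
--     if 0 <= u <= 8 and 0 <= v <= 8:
--         cx, cy = 15 + 93 * u, 68 + 66 * v
--         # same circle test as A, scaled by 2 to exact integers
--         if (2 * (cx - x) + 25) ** 2 + (2 * (cy - y) + 25) ** 2 <= 1352:
--             return (cx, cy)
-- ===== Notes on version B (the rewrite author's own statement) =====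
-- stated objective: simpler
-- what changed: B replaces A's linear scan of the 81 precomputed grid centers by a direct inversion of the lattice: floor-division rounding to the unique candidate cell, a range check, then the same circle test on that single center.
import Mathlib
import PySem

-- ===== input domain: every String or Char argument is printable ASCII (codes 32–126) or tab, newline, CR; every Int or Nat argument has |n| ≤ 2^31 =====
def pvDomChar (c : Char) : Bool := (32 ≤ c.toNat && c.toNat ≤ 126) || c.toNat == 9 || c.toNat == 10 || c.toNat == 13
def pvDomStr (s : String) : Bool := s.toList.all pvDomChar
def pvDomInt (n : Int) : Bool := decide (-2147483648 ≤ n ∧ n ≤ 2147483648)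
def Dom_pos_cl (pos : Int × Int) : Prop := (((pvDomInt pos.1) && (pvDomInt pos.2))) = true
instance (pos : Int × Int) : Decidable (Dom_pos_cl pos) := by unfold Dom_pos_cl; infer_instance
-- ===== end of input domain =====

-- B replaces A's scan of 81 grid cells by an O(1) lattice inversion to the single candidate cell.
-- Both ports state A's float circle test '(du+12.5)^2+(dv+12.5)^2 <= 338' exactly, scaled by 2 to
-- integers: '(2*du+25)^2+(2*dv+25)^2 <= 1352' (all quantities are small multiples of 0.25, so the
-- Python float comparison is decided identically).

-- ===== PORT A =====
-- position = [(u, v) for v in range(68, 700, 66) for u in range(15, 800, 93)]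
def posListA : List (Int × Int) :=
  (PySem.List.pyRange 68 700 66).flatMap (fun v =>
    (PySem.List.pyRange 15 800 93).map (fun u => (u, v)))

-- inPos(pos, pos_piece, r=13), integer-scaled (exact, see header)
def inPosA (pos pos_piece : Int × Int) : Bool :=
  (2 * (pos_piece.1 - pos.1) + 25) ^ 2 + (2 * (pos_piece.2 - pos.2) + 25) ^ 2 ≤ 2 * (2 * 13) ^ 2

-- the body of A's for-loop: 'if inPos(pos, position[i]): k = i'
def stepA (pos : Int × Int) (k i : Nat) : Nat :=
  match PySem.List.pyGet? posListA (Int.ofNat i) with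
  | some p => if inPosA pos p then i else k
  | none => k

def pos_cl (pos : Int × Int) : Option (Int × Int) :=
  let k := (List.range 81).foldl (stepA pos) 400
  if k = 400 then none
  else PySem.List.pyGet? posListA (Int.ofNat k)

-- ===== PORT B =====
def pos_cl_alt (pos : Int × Int) : Option (Int × Int) :=
  let x := pos.1
  let y := pos.2
  let u := PySem.Int.floordiv (x + 19) 93
  let v := PySem.Int.floordiv (2 * y - 95) 132
  if 0 ≤ u ∧ u ≤ 8 ∧ 0 ≤ v ∧ v ≤ 8 then
    let cx := 15 + 93 * u
    let cy := 68 + 66 * v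
    if (2 * (cx - x) + 25) ^ 2 + (2 * (cy - y) + 25) ^ 2 ≤ 1352 then some (cx, cy)
    else none
  else none

-- ===== PRECONDITION & SPEC =====
def Spec_pos_cl (pos : Int × Int) (out : Option (Int × Int)) : Prop := out = pos_cl_alt pos
instance (pos : Int × Int) (out : Option (Int × Int)) : Decidable (Spec_pos_cl pos out) := by unfold Spec_pos_cl; infer_instance

-- ===== CLAIM (what is proved, stated in full; the proofs are below) =====
def Claim_equal_pos_cl : Prop := ∀ (pos : Int × Int), Dom_pos_cl pos → Spec_pos_cl pos (pos_cl pos)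

-- ===== LEMMAS AND PROOFS =====

-- the scanned centers, in closed form (checked instance-wise on the concrete list)
set_option maxRecDepth 20000 in
theorem posListA_get (i : Nat) (h : i < 81) :
    PySem.List.pyGet? posListA (Int.ofNat i) =
      some (15 + 93 * ((i % 9 : Nat) : Int), 68 + 66 * ((i / 9 : Nat) : Int)) := by
  revert h; revert i; decide

theorem sq_bound (s t : Int) (h : s ^ 2 + t ^ 2 ≤ 1352) :
    -36 ≤ s ∧ s ≤ 36 ∧ -36 ≤ t ∧ t ≤ 36 := by
  refine ⟨?_, ?_, ?_, ?_⟩ <;> nlinarith [sq_nonneg s, sq_nonneg t]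

-- the loop of A keeps the LAST matching index; with at most one match it is 'the' match or 400
theorem foldl_unique (m : Nat → Bool) (j : Nat) (n : Nat)
    (hj : ∀ i, i < n → m i = true → i = j) :
    (List.range n).foldl (fun k i => if m i then i else k) 400 =
      if j < n ∧ m j then j else 400 := by
  induction n with
  | zero => simp
  | succ n ih =>
    rw [List.range_succ, List.foldl_append]
    have ih' := ih (fun i h hm => hj i (Nat.lt_succ_of_lt h) hm)
    simp only [List.foldl_cons, List.foldl_nil]
    by_cases hm : m n = true
    · have hjn : n = j := hj n (Nat.lt_succ_self n) hm
      subst hjn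
      simp [hm]
    · simp only [hm, Bool.false_eq_true, if_false, ih']
      by_cases hlt : j < n
      · simp [hlt, Nat.lt_succ_of_lt hlt]
      · by_cases hj' : j = n
        · subst hj'; simp [hm]
        · have : ¬ j < n + 1 := by omega
          simp [hlt, this]

theorem pos_cl_eq_alt (pos : Int × Int) : pos_cl pos = pos_cl_alt pos := by
  obtain ⟨x, y⟩ := pos
  have h93 : PySem.Int.floordiv (x + 19) 93 = (x + 19) / 93 :=
    PySem.Int.floordiv_eq_ediv_of_pos (by norm_num)
  have h132 : PySem.Int.floordiv (2 * y - 95) 132 = (2 * y - 95) / 132 :=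
    PySem.Int.floordiv_eq_ediv_of_pos (by norm_num)
  set u : Int := (x + 19) / 93 with hu
  set v : Int := (2 * y - 95) / 132 with hv
  -- the loop test as a function of the loop index
  set m : Nat → Bool := fun i =>
    match PySem.List.pyGet? posListA (Int.ofNat i) with
    | some p => inPosA (x, y) p
    | none => false with hm
  have hloop : (List.range 81).foldl (stepA (x, y)) 400 =
      (List.range 81).foldl (fun k i => if m i then i else k) 400 := by
    apply PySem.List.foldl_congr_mem
    intro k i hi
    unfold stepA
    simp only [hm]
    cases PySem.List.pyGet? posListA (Int.ofNat i) <;> simp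
  -- any match forces the index: i % 9 = u and i / 9 = v
  have hmatch : ∀ i, i < 81 → m i = true →
      ((i % 9 : Nat) : Int) = u ∧ ((i / 9 : Nat) : Int) = v := by
    intro i hlt hmi
    rw [hm] at hmi
    simp only [posListA_get i hlt] at hmi
    unfold inPosA at hmi
    simp only [decide_eq_true_eq] at hmi
    have hb := sq_bound _ _ (le_trans hmi (by norm_num))
    constructor
    · omega
    · omega
  by_cases hin : 0 ≤ u ∧ u ≤ 8 ∧ 0 ≤ v ∧ v ≤ 8
  · obtain ⟨hu0, hu8, hv0, hv8⟩ := hin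
    set j : Nat := (9 * v + u).toNat with hj
    have hjlt : j < 81 := by omega
    have hj9 : ((j % 9 : Nat) : Int) = u ∧ ((j / 9 : Nat) : Int) = v := by omega
    have huniq : ∀ i, i < 81 → m i = true → i = j := by
      intro i hlt hmi
      have := hmatch i hlt hmi
      omega
    have hfold := foldl_unique m j 81 huniq
    by_cases hmj : m j = true
    · -- A returns center j; B's candidate is the same point and its test is m j
      have hA : pos_cl (x, y) = PySem.List.pyGet? posListA (Int.ofNat j) := by
        unfold pos_cl
        simp only [hloop, hfold, hjlt, hmj, and_true, if_true]
        have hne : j ≠ 400 := by omega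
        simp [hne]
      rw [hA, posListA_get j hjlt]
      rw [hm] at hmj
      simp only [posListA_get j hjlt] at hmj
      unfold inPosA at hmj
      simp only [decide_eq_true_eq] at hmj
      unfold pos_cl_alt
      simp only [h93, h132]
      rw [if_pos ⟨hu0, hu8, hv0, hv8⟩]
      rw [if_pos (by rw [← hj9.1, ← hj9.2]; exact le_trans hmj (by norm_num))]
      rw [hj9.1, hj9.2]
    · have hA : pos_cl (x, y) = none := by
        unfold pos_cl
        simp only [hloop, hfold]
        simp [hmj]
      rw [hA]
      unfold pos_cl_alt
      simp only [h93, h132]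
      rw [if_pos ⟨hu0, hu8, hv0, hv8⟩]
      rw [if_neg ?_]
      intro hcon
      apply hmj
      rw [hm]
      simp only [posListA_get j hjlt]
      unfold inPosA
      simp only [decide_eq_true_eq]
      rw [hj9.1, hj9.2]
      exact le_trans hcon (by norm_num)
  · -- no cell can match: every match would force u,v into range
    have huniq : ∀ i, i < 81 → m i = true → i = 81 := by
      intro i hlt hmi
      have := hmatch i hlt hmi
      omega
    have hfold := foldl_unique m 81 81 huniq
    have hA : pos_cl (x, y) = none := by
      unfold pos_cl
      simp only [hloop, hfold]
      simp
    rw [hA]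
    unfold pos_cl_alt
    simp only [h93, h132]
    rw [if_neg hin]

-- ===== VERDICT (by name: the statement is the Claim_ definition above) =====
theorem pos_cl_spec : Claim_equal_pos_cl := by
  intro pos _
  unfold Spec_pos_cl
  exact pos_cl_eq_alt pos
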